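-- pv_equiv track=rewrite | github.com/mnicoletti15/recursive-matrix-reduction-python | matreducalg.py | is_leading_entry
-- ===== SOURCE A (Python) =====
-- def get_index(A, i, j):
-- 	return A[i-1][j-1]
--
-- def get_row(A, i):
-- 	return A[i-1]
--
-- def get_col(A, j):
-- 	B = []
-- 	for row in A:
-- 		B.append(row[j-1])
-- 	return B
--
-- def is_leading_entry(A, i, j):
-- 	row = get_row(A, i)
-- 	col = get_col(A, j)
-- 	if get_index(A, i, j)==0:
-- 		return False
-- 	for item in row[:j-1]:
-- 		if item != 0:
-- 			return False
-- 	for item in col[i:]: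
-- 		if item != 0:
-- 			return False
-- 	return True
-- ===== SOURCE B (Python) =====
-- def is_leading_entry(A, i, j):
--     # position-based check: the bottommost nonzero of column j must sit at row i-1,
--     # and the leftmost nonzero of the row must sit at column j-1
--     row = A[i - 1]
--     ii = (i - 1) % len(A)
--     jj = (j - 1) % len(row)
--     last = None
--     for r, arow in enumerate(A):
--         if arow[j - 1] != 0:
--             last = r
--     if last != ii:
--         return False
--     first = next((k for k, v in enumerate(row) if v != 0), None)
--     return first == jj
-- ===== Notes on version B (the rewrite author's own statement) =====
-- stated objective: alternative
-- what changed: B replaces A's three helpers, materialised column and prefix/suffix slice scans by index comparisons: it keeps the row index of the column's last nonzero entry in one accumulator pass and compares the position of the row's first nonzero entry with the normalised j-1.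
-- intended difference: For i = 0 (Python wraps to the last row) A's suffix slice col[i:] is the whole column and contains the entry itself, so A returns False even when the entry is a genuine leading entry of the last row; B returns True there, the intended value under wraparound indexing. — e.g. on is_leading_entry([[1]], 0, 1): A returns false, B returns true
import Mathlib
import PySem

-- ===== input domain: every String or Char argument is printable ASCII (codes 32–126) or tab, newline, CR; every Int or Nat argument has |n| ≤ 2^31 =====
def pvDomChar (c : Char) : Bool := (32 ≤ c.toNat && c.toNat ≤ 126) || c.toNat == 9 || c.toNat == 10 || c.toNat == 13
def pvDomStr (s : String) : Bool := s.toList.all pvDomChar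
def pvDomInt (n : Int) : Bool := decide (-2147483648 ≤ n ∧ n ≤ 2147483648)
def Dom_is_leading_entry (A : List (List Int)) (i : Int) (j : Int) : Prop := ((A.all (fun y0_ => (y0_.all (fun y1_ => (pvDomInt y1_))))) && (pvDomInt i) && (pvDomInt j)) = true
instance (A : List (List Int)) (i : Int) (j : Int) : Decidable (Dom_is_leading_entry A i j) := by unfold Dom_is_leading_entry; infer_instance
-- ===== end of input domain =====

-- B checks positions (leftmost nonzero of the row, bottommost nonzero of the column) instead of
-- building the column and scanning prefix/suffix slices; objective: alternative decomposition.

-- ===== PORT A =====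
-- helper get_col: the j-th column; none = IndexError raised in some row
def pv_get_col (A : List (List Int)) (j : Int) : Option (List Int) :=
  A.mapM (fun row => PySem.List.pyGet? row (j - 1))

def is_leading_entry (A : List (List Int)) (i : Int) (j : Int) : Bool :=
  match PySem.List.pyGet? A (i - 1), pv_get_col A j with
  | some row, some col =>
    match PySem.List.pyGet? row (j - 1) with
    | some e =>
      if e == 0 then false
      else if (PySem.List.slice row none (some (j - 1))).any (fun x => x != 0) then false
      else if (PySem.List.slice col (some i) none).any (fun x => x != 0) then false
      else true
    | none => false
  | _, _ => false

-- ===== PORT B =====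
def is_leading_entry_alt (A : List (List Int)) (i : Int) (j : Int) : Bool :=
  (PySem.List.pyGet? A (i - 1)).elim false (fun row =>
    (PySem.Int.mod? (i - 1) (A.length : Int)).elim false (fun ii =>
      (PySem.Int.mod? (j - 1) (row.length : Int)).elim false (fun jj =>
        let last := (PySem.List.enumerate A 0).foldl
          (fun acc p => (PySem.List.pyGet? p.2 (j - 1)).elim acc
            (fun v => if v != 0 then some p.1 else acc)) (none : Option Int)
        if last != some ii then false
        else row.findIdx? (fun v => v != 0) == some jj.toNat)))

-- ===== PRECONDITION & SPEC =====
-- A raises IndexError iff the row index i-1 is out of range for A or the column index j-1 is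
-- out of range for some row (get_col touches every row); Pre_ excludes exactly those inputs.
def Pre_is_leading_entry (A : List (List Int)) (i : Int) (j : Int) : Prop :=
  PySem.Raise.InRange A.length (i - 1) ∧ ∀ row ∈ A, PySem.Raise.InRange row.length (j - 1)
instance (A : List (List Int)) (i : Int) (j : Int) : Decidable (Pre_is_leading_entry A i j) := by
  unfold Pre_is_leading_entry; infer_instance

def pvWitness_is_leading_entry : List (List Int) × Int × Int := ([[1, 2], [0, 3]], 1, 1)

-- At i = 0 (Python wraps to the last row) A's suffix slice col[i:] is the WHOLE column, which
-- contains the entry itself, so A returns False even when the entry is a genuine leading entry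
-- of the last row; B returns True there, the intended value.
def D_is_leading_entry (A : List (List Int)) (i : Int) (j : Int) : Prop :=
  i = 0 ∧ (A.getLast?.any fun r =>
    (r.take ((j - 1).emod (r.length : Int)).toNat).all (· == 0) &&
    (r.getD ((j - 1).emod (r.length : Int)).toNat 0 != 0)) = true
instance (A : List (List Int)) (i : Int) (j : Int) : Decidable (D_is_leading_entry A i j) := by
  unfold D_is_leading_entry; infer_instance

def Spec_is_leading_entry (A : List (List Int)) (i : Int) (j : Int) (out : Bool) : Prop :=
  ¬ D_is_leading_entry A i j → out = is_leading_entry_alt A i j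
instance (A : List (List Int)) (i : Int) (j : Int) (out : Bool) : Decidable (Spec_is_leading_entry A i j out) := by
  unfold Spec_is_leading_entry; infer_instance

def pvDiffWitness_is_leading_entry : List (List Int) × Int × Int := ([[1]], 0, 1)
def pvDiffWitnessOut_is_leading_entry : Bool × Bool := (false, true)

-- ===== CLAIM (what is proved, stated in full; the proofs are below) =====
def Claim_unchanged_is_leading_entry : Prop := ∀ (A : List (List Int)) (i : Int) (j : Int), Dom_is_leading_entry A i j → Pre_is_leading_entry A i j → Spec_is_leading_entry A i j (is_leading_entry A i j)
def Claim_changed_is_leading_entry : Prop := Dom_is_leading_entry (pvDiffWitness_is_leading_entry.1) (pvDiffWitness_is_leading_entry.2.1) (pvDiffWitness_is_leading_entry.2.2) ∧ Pre_is_leading_entry (pvDiffWitness_is_leading_entry.1) (pvDiffWitness_is_leading_entry.2.1) (pvDiffWitness_is_leading_entry.2.2) ∧ D_is_leading_entry (pvDiffWitness_is_leading_entry.1) (pvDiffWitness_is_leading_entry.2.1) (pvDiffWitness_is_leading_entry.2.2) ∧ is_leading_entry (pvDiffWitness_is_leading_entry.1) (pvDiffWitness_is_leading_entry.2.1) (pvDiffWitness_is_leading_entry.2.2)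 = pvDiffWitnessOut_is_leading_entry.1 ∧ is_leading_entry_alt (pvDiffWitness_is_leading_entry.1) (pvDiffWitness_is_leading_entry.2.1) (pvDiffWitness_is_leading_entry.2.2) = pvDiffWitnessOut_is_leading_entry.2 ∧ pvDiffWitnessOut_is_leading_entry.1 ≠ pvDiffWitnessOut_is_leading_entry.2
def Claim_exact_is_leading_entry : Prop := ∀ (A : List (List Int)) (i : Int) (j : Int), Dom_is_leading_entry A i j → Pre_is_leading_entry A i j → D_is_leading_entry A i j → is_leading_entry A i j ≠ is_leading_entry_alt A i j

-- ===== LEMMAS AND PROOFS =====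

-- proof-only helper: the accumulator loop of B's column pass, on an already-extracted column
def lastLoop (xs : List Int) (s : Int) (acc : Option Int) : Option Int :=
  (PySem.List.enumerate xs s).foldl (fun acc p => if p.2 != 0 then some p.1 else acc) acc

-- the per-row column value that get_col extracts
def colfun (j : Int) (r : List Int) : Int := r.getD ((j - 1).emod (r.length : Int)).toNat 0

lemma pyGet_emod {α : Type} (xs : List α) (t : Int)
    (h1 : -(xs.length : Int) ≤ t) (h2 : t < (xs.length : Int)) :
    PySem.List.pyGet? xs t = xs[(t.emod (xs.length : Int)).toNat]? := by
  have emod_eq : ∀ a b : Int, a.emod b = a % b := fun _ _ => rfl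
  unfold PySem.List.pyGet? PySem.List.pyIdx?
  simp only [emod_eq]
  by_cases h : 0 ≤ t
  · rw [if_pos h, if_pos h2]
    rw [Int.emod_eq_of_lt h h2]
    rfl
  · rw [if_neg h, if_pos h1]
    have hn : t % (xs.length : Int) = t + xs.length := by
      have e1 : (t + (xs.length:Int) * 1) % (xs.length:Int) = t % (xs.length:Int) :=
        Int.add_mul_emod_self_left t (xs.length:Int) 1
      have e2 : (t + (xs.length:Int)) % (xs.length:Int) = t + xs.length :=
        Int.emod_eq_of_lt (by omega) (by omega)
      have : t % (xs.length:Int) = t + xs.length := by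
        rw [← e2]; rw [mul_one] at e1; rw [e1]
      exact this
    have hidx : (t % (xs.length:Int)).toNat = xs.length - (-t).toNat := by
      rw [hn]; omega
    rw [hidx]
    rfl

lemma emod_toNat_lt (t : Int) (n : Nat) (hn : 0 < n) : (t.emod (n : Int)).toNat < n := by
  have emod_eq : ∀ a b : Int, a.emod b = a % b := fun _ _ => rfl
  rw [emod_eq]
  have h1 : 0 ≤ t % (n : Int) := Int.emod_nonneg t (by omega)
  have h2 : t % (n : Int) < n := Int.emod_lt_of_pos t (by omega)
  omega


lemma get_col_eq (A : List (List Int)) (j : Int)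
    (h : ∀ row ∈ A, PySem.Raise.InRange row.length (j - 1)) :
    A.mapM (fun row => PySem.List.pyGet? row (j - 1)) = some (A.map (colfun j)) := by
  induction A with
  | nil => rfl
  | cons r rs ih =>
    have hr := h r (by simp)
    obtain ⟨hr1, hr2⟩ := hr
    have hrl : 0 < r.length := by omega
    have : PySem.List.pyGet? r (j - 1) = some (colfun j r) := by
      rw [pyGet_emod r _ hr1 hr2, colfun]
      rw [List.getElem?_eq_getElem (emod_toNat_lt _ _ hrl)]
      rw [List.getD_eq_getElem r 0 (emod_toNat_lt _ _ hrl)]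
    rw [List.mapM_cons, this, ih (fun row hrow => h row (by simp [hrow]))]
    rfl


lemma lastLoop_append_singleton (xs : List Int) (x : Int) (s : Int) (acc : Option Int) :
    lastLoop (xs ++ [x]) s acc = if x != 0 then some (s + xs.length) else lastLoop xs s acc := by
  unfold lastLoop
  rw [PySem.List.enumerate_append, List.foldl_append]
  by_cases hx : x = 0 <;>
    simp [PySem.List.enumerate_cons, PySem.List.enumerate_nil, hx]

lemma lastLoop_bound (xs : List Int) (s : Int) :
    ∀ u, lastLoop xs s none = some u → ∃ k, k < xs.length ∧ u = s + k := by
  induction xs using List.reverseRecOn with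
  | nil => intro u hu; simp [lastLoop, PySem.List.enumerate_nil] at hu
  | append_singleton ys x ih =>
    intro u hu
    rw [lastLoop_append_singleton] at hu
    by_cases hx : x = 0
    · rw [if_neg (by simp [hx])] at hu
      obtain ⟨k, hk, rfl⟩ := ih u hu
      exact ⟨k, by simp; omega, rfl⟩
    · simp only [bne_iff_ne, ne_eq, hx, not_false_eq_true, if_true] at hu
      exact ⟨ys.length, by simp, (Option.some.inj hu).symm⟩

lemma getD_append_last (ys : List Int) (x : Int) : (ys ++ [x]).getD ys.length 0 = x := by
  simp [List.getD]

lemma getD_append_left (ys : List Int) (x : Int) (n : Nat) (h : n < ys.length) :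
    (ys ++ [x]).getD n 0 = ys.getD n 0 := by
  simp [List.getD, List.getElem?_append_left h]

lemma lastLoop_eq_some_iff (xs : List Int) (s : Int) (t : Nat) (ht : t < xs.length) :
    lastLoop xs s none = some (s + t) ↔
      (xs.getD t 0 ≠ 0 ∧ ∀ k, t < k → k < xs.length → xs.getD k 0 = 0) := by
  induction xs using List.reverseRecOn generalizing t with
  | nil => simp at ht
  | append_singleton ys x ih =>
    rw [lastLoop_append_singleton]
    have hlen : (ys ++ [x]).length = ys.length + 1 := by simp
    by_cases hx : x = 0
    · rw [if_neg (by simp [hx])]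
      by_cases htl : t = ys.length
      · constructor
        · intro hu
          obtain ⟨k, hk, he⟩ := lastLoop_bound ys s _ hu
          omega
        · intro ⟨h1, _⟩
          exfalso; apply h1
          subst htl
          rw [getD_append_last]
          exact hx
      · have htl' : t < ys.length := by omega
        rw [ih t htl']
        constructor
        · intro ⟨h1, h2⟩
          refine ⟨by rwa [getD_append_left _ _ _ htl'], ?_⟩
          intro k hk1 hk2
          by_cases hkl : k = ys.length
          · subst hkl; rw [getD_append_last]; exact hx
          · rw [getD_append_left _ _ _ (by omega)]; exact h2 k hk1 (by omega)
        · intro ⟨h1, h2⟩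
          refine ⟨by rwa [getD_append_left _ _ _ htl'] at h1, ?_⟩
          intro k hk1 hk2
          have := h2 k hk1 (by simp; omega)
          rwa [getD_append_left _ _ _ (by omega)] at this
    · simp only [bne_iff_ne, ne_eq, hx, not_false_eq_true, if_true]
      by_cases htl : t = ys.length
      · subst htl
        constructor
        · intro _
          refine ⟨?_, ?_⟩
          · rw [getD_append_last]; exact hx
          · intro k hk1 hk2; simp at hk2; omega
        · intro _; rfl
      · have htl' : t < ys.length := by omega
        constructor
        · intro hu
          exfalso
          have : (s : Int) + ys.length = s + t := Option.some.inj hu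
          omega
        · intro ⟨h1, h2⟩
          exfalso
          have := h2 ys.length (by omega) (by simp)
          rw [getD_append_last] at this
          exact hx this

lemma enumerate_map {α β : Type} (f : α → β) (xs : List α) (s : Int) :
    PySem.List.enumerate (xs.map f) s = (PySem.List.enumerate xs s).map (fun p => (p.1, f p.2)) := by
  induction xs generalizing s with
  | nil => simp [PySem.List.enumerate_nil]
  | cons y ys ih =>
    simp [PySem.List.enumerate_cons, ih]

lemma fmod_eq_emod_of_pos (a b : Int) (hb : 0 < b) : a.fmod b = a.emod b := by
  rw [Int.fmod_eq_emod, if_pos (Or.inl (le_of_lt hb))]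
  have : a.emod b = a % b := rfl
  omega

lemma findIdx_iff (row : List Int) (t : Nat) (ht : t < row.length) :
    (row.findIdx? (fun v => v != 0) = some t) ↔
      (row.getD t 0 ≠ 0 ∧ ∀ k < t, row.getD k 0 = 0) := by
  rw [List.findIdx?_eq_some_iff_getElem]
  constructor
  · intro ⟨h, h1, h2⟩
    refine ⟨by rw [List.getD_eq_getElem _ _ ht]; simpa using h1, ?_⟩
    intro k hk
    have := h2 k hk
    rw [List.getD_eq_getElem _ _ (by omega)]
    simpa using this
  · intro ⟨h1, h2⟩
    refine ⟨ht, by rw [List.getD_eq_getElem _ _ ht] at h1; simpa using h1, ?_⟩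
    intro k hk
    have := h2 k hk
    rw [List.getD_eq_getElem _ _ (by omega)] at this
    simpa using this

lemma any_take_iff (xs : List Int) (t : Nat) :
    ((xs.take t).any (fun x => x != 0) = true) ↔
      ∃ k, k < t ∧ k < xs.length ∧ xs.getD k 0 ≠ 0 := by
  rw [List.any_eq_true]
  constructor
  · intro ⟨x, hx, hp⟩
    obtain ⟨k, hk, he⟩ := List.mem_take_iff_getElem.mp hx
    refine ⟨k, by omega, by omega, ?_⟩
    rw [List.getD_eq_getElem _ _ (by omega), he]
    simpa using hp
  · intro ⟨k, hk1, hk2, hne⟩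
    refine ⟨xs.getD k 0, ?_, by simpa using hne⟩
    rw [List.mem_take_iff_getElem]
    exact ⟨k, by omega, (List.getD_eq_getElem _ _ hk2).symm⟩

lemma any_drop_iff (xs : List Int) (t : Nat) :
    ((xs.drop t).any (fun x => x != 0) = true) ↔
      ∃ k, t ≤ k ∧ k < xs.length ∧ xs.getD k 0 ≠ 0 := by
  rw [List.any_eq_true]
  constructor
  · intro ⟨x, hx, hp⟩
    obtain ⟨k, hk, he⟩ := List.mem_drop_iff_getElem.mp hx
    refine ⟨t + k, by omega, by omega, ?_⟩
    rw [List.getD_eq_getElem _ _ (by omega), he]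
    simpa using hp
  · intro ⟨k, hk1, hk2, hne⟩
    refine ⟨xs.getD k 0, ?_, by simpa using hne⟩
    rw [List.mem_drop_iff_getElem]
    refine ⟨k - t, by omega, ?_⟩
    rw [← List.getD_eq_getElem xs 0 (show t + (k - t) < xs.length by omega)]
    congr 1
    omega

lemma main_ne (A : List (List Int)) (i j : Int)
    (hpre1 : PySem.Raise.InRange A.length (i - 1))
    (hpre2 : ∀ row ∈ A, PySem.Raise.InRange row.length (j - 1)) :
    i ≠ 0 → is_leading_entry A i j = is_leading_entry_alt A i j := by
  intro hi
  obtain ⟨hp1a, hp1b⟩ := hpre1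
  have hm : 0 < A.length := by by_contra h; omega
  set ii : Int := (i - 1).emod (A.length : Int) with hii
  have hiinn : 0 ≤ ii := Int.emod_nonneg _ (by omega)
  set iiN : Nat := ii.toNat with hiiN
  have hiiNlt : iiN < A.length := emod_toNat_lt _ _ hm
  set row : List Int := A.getD iiN [] with hrow
  have hrowe : A.getD iiN [] = A[iiN] := List.getD_eq_getElem _ _ hiiNlt
  have hrowmem : row ∈ A := by rw [hrow, hrowe]; exact List.getElem_mem hiiNlt
  obtain ⟨hp2a, hp2b⟩ := hpre2 row hrowmem
  have hn : 0 < row.length := by by_contra h; omega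
  set jjN : Nat := ((j - 1).emod (row.length : Int)).toNat with hjjN
  have hjjNlt : jjN < row.length := emod_toNat_lt _ _ hn
  set e : Int := row.getD jjN 0 with he
  set col : List Int := A.map (colfun j) with hcolv
  have hcollen : col.length = A.length := by simp [hcolv]
  have hcoliiN : col.getD iiN 0 = e := by
    rw [hcolv, List.getD_eq_getElem _ _ (by simpa using hiiNlt), List.getElem_map]
    rw [he, colfun, hjjN, hrow, hrowe]
  -- unfold A's port
  have hget1 : PySem.List.pyGet? A (i - 1) = some row := by
    rw [pyGet_emod A _ hp1a hp1b, ← hii, ← hiiN, List.getElem?_eq_getElem hiiNlt, hrow, hrowe]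
  have hcol : pv_get_col A j = some col := by
    rw [pv_get_col, get_col_eq A j (fun r hr => hpre2 r hr), hcolv]
  have hget2 : PySem.List.pyGet? row (j - 1) = some e := by
    rw [pyGet_emod row _ hp2a hp2b, ← hjjN, List.getElem?_eq_getElem hjjNlt, he,
      List.getD_eq_getElem _ _ hjjNlt]
  have hslice1 : PySem.List.slice row none (some (j - 1)) = row.take jjN := by
    by_cases hj : 0 ≤ j - 1
    · rw [PySem.List.slice_to row hj]
      congr 1
      have h3 : (j-1).emod (row.length:Int) = (j-1) % (row.length:Int) := rfl
      have h4 := Int.emod_eq_of_lt hj hp2b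
      omega
    · have hk : 0 < (-(j-1)).toNat := by omega
      have : some (j - 1) = some (-(((-(j-1)).toNat : Nat) : Int)) := by congr 1; omega
      rw [this, PySem.List.slice_to_neg_natCast row _ hk]
      congr 1
      have : (j - 1).emod (row.length : Int) = j - 1 + row.length := by
        have e1 : (j - 1 + (row.length:Int) * 1) % (row.length:Int) = (j-1) % (row.length:Int) :=
          Int.add_mul_emod_self_left (j-1) (row.length:Int) 1
        have e2 : (j - 1 + (row.length:Int)) % (row.length:Int) = j - 1 + row.length :=
          Int.emod_eq_of_lt (by omega) (by omega)
        have h3 : (j-1).emod (row.length:Int) = (j-1) % (row.length:Int) := rfl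
        rw [mul_one] at e1
        omega
      omega
  have hslice2 : PySem.List.slice col (some i) none = col.drop (iiN + 1) := by
    by_cases hipos : 0 < i
    · rw [PySem.List.slice_from col (by omega)]
      congr 1
      have : ii = i - 1 := by rw [hii]; exact Int.emod_eq_of_lt (by omega) hp1b
      omega
    · have hineg : i < 0 := by omega
      have hk : 0 < (-i).toNat := by omega
      have hs : some i = some (-(((-i).toNat : Nat) : Int)) := by congr 1; omega
      rw [hs, PySem.List.slice_from_neg_natCast col _ hk]
      congr 1
      have : ii = i - 1 + A.length := by
        rw [hii]
        have e1 : (i - 1 + (A.length:Int) * 1) % (A.length:Int) = (i-1) % (A.length:Int) :=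
          Int.add_mul_emod_self_left (i-1) (A.length:Int) 1
        have e2 : (i - 1 + (A.length:Int)) % (A.length:Int) = i - 1 + A.length :=
          Int.emod_eq_of_lt (by omega) (by omega)
        have h3 : (i-1).emod (A.length:Int) = (i-1) % (A.length:Int) := rfl
        rw [mul_one] at e1
        omega
      omega
  -- unfold B's port
  have hmod1 : PySem.Int.mod? (i - 1) (A.length : Int) = some ii := by
    unfold PySem.Int.mod?
    rw [if_neg (by omega : ¬ (A.length : Int) = 0), fmod_eq_emod_of_pos _ _ (by omega)]
  have hmod2 : PySem.Int.mod? (j - 1) (row.length : Int) = some ((j-1).emod (row.length : Int)) := by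
    unfold PySem.Int.mod?
    rw [if_neg (by omega : ¬ (row.length : Int) = 0), fmod_eq_emod_of_pos _ _ (by omega)]
  have hfold : (PySem.List.enumerate A 0).foldl
      (fun acc p => (PySem.List.pyGet? p.2 (j - 1)).elim acc
        (fun v => if v != 0 then some p.1 else acc)) (none : Option Int) = lastLoop col 0 none := by
    rw [lastLoop, hcolv, enumerate_map, List.foldl_map]
    apply PySem.List.foldl_congr_mem
    intro acc p hp
    obtain ⟨k, hk, hpe⟩ := (PySem.List.mem_enumerate_iff A 0 p).mp hp
    have hpmem : p.2 ∈ A := by rw [hpe]; exact List.getElem_mem hk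
    obtain ⟨ha, hb⟩ := hpre2 p.2 hpmem
    have hple : 0 < p.2.length := by by_contra h; omega
    rw [pyGet_emod p.2 _ ha hb, List.getElem?_eq_getElem (emod_toNat_lt _ _ hple)]
    simp only [colfun, Option.elim_some]
    rw [List.getD_eq_getElem _ _ (emod_toNat_lt _ _ hple)]
  have hA : is_leading_entry A i j =
      (if e == 0 then false
       else if ((row.take jjN).any (fun x => x != 0)) then false
       else if ((col.drop (iiN + 1)).any (fun x => x != 0)) then false
       else true) := by
    rw [is_leading_entry]
    simp only [hget1, hcol, hget2, hslice1, hslice2]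
  have hB : is_leading_entry_alt A i j =
      (if lastLoop col 0 none != some ii then false
       else (row.findIdx? (fun v => v != 0)) == some jjN) := by
    rw [is_leading_entry_alt]
    simp only [hget1, hmod1, hmod2, Option.elim_some, hfold]
    rfl
  rw [hA, hB]
  have hiiI : ii = (0 : Int) + (iiN : Int) := by omega
  -- case analysis
  by_cases hez : e = 0
  · rw [if_pos (by simpa using hez)]
    have hll : lastLoop col 0 none ≠ some ii := by
      intro hcontra
      rw [hiiI, lastLoop_eq_some_iff col 0 iiN (by omega)] at hcontra
      exact hcontra.1 (by rw [hcoliiN]; exact hez)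
    rw [if_pos (by simpa [bne_iff_ne] using hll)]
  · rw [if_neg (by simpa using hez)]
    by_cases hQ : (col.drop (iiN + 1)).any (fun x => x != 0) = true
    · obtain ⟨k, hk1, hk2, hk3⟩ := (any_drop_iff col (iiN + 1)).mp hQ
      have hll : lastLoop col 0 none ≠ some ii := by
        intro hcontra
        rw [hiiI, lastLoop_eq_some_iff col 0 iiN (by omega)] at hcontra
        exact hk3 (hcontra.2 k (by omega) hk2)
      by_cases hP : (row.take jjN).any (fun x => x != 0) = true
      · rw [if_pos hP, if_pos (by simpa [bne_iff_ne] using hll)]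
      · rw [if_neg hP, if_pos hQ, if_pos (by simpa [bne_iff_ne] using hll)]
    · have hll : lastLoop col 0 none = some ii := by
        rw [hiiI, lastLoop_eq_some_iff col 0 iiN (by omega)]
        refine ⟨by rw [hcoliiN]; exact hez, ?_⟩
        intro k hk1 hk2
        by_contra hc
        exact hQ ((any_drop_iff col (iiN + 1)).mpr ⟨k, by omega, hk2, hc⟩)
      rw [hll]
      simp only [bne_self_eq_false, Bool.false_eq_true, if_false]
      by_cases hP : (row.take jjN).any (fun x => x != 0) = true
      · rw [if_pos hP]
        obtain ⟨k, hk1, hk2, hk3⟩ := (any_take_iff row jjN).mp hP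
        have hfi : row.findIdx? (fun v => v != 0) ≠ some jjN := by
          intro hcontra
          exact hk3 (((findIdx_iff row jjN hjjNlt).mp hcontra).2 k hk1)
        symm
        simpa [beq_eq_false_iff_ne] using hfi
      · rw [if_neg hP, if_neg hQ]
        have hfi : row.findIdx? (fun v => v != 0) = some jjN := by
          rw [findIdx_iff row jjN hjjNlt]
          refine ⟨he ▸ hez, ?_⟩
          intro k hk
          by_contra hc
          exact hP ((any_take_iff row jjN).mpr ⟨k, hk, by omega, hc⟩)
        symm
        simpa [beq_iff_eq] using hfi

lemma emod_of_nonneg_lt (t n : Int) (h1 : 0 ≤ t) (h2 : t < n) : t.emod n = t :=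
  Int.emod_eq_of_lt h1 h2

lemma emod_of_neg (t n : Int) (_hn : 0 < n) (h1 : -n ≤ t) (h2 : t < 0) : t.emod n = t + n := by
  have e1 : (t + n * 1) % n = t % n := Int.add_mul_emod_self_left t n 1
  have e2 : (t + n) % n = t + n := Int.emod_eq_of_lt (by omega) (by omega)
  have h3 : t.emod n = t % n := rfl
  rw [mul_one] at e1
  omega

lemma getLastD_eq_getD (A : List (List Int)) (_h : A ≠ []) :
    A.getLastD [] = A.getD (A.length - 1) [] := by
  rw [List.getLastD_eq_getLast?, List.getLast?_eq_getElem?]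
  rfl

lemma zero_A_false (A : List (List Int)) (j : Int)
    (hpre1 : PySem.Raise.InRange A.length (0 - 1))
    (hpre2 : ∀ row ∈ A, PySem.Raise.InRange row.length (j - 1)) :
    is_leading_entry A 0 j = false := by
  obtain ⟨hp1a, hp1b⟩ := hpre1
  have hm : 0 < A.length := by by_contra h; omega
  set ii : Int := ((0:Int) - 1).emod (A.length : Int) with hii
  have hiieq : ii = A.length - 1 := by
    rw [hii, emod_of_neg _ _ (by omega) (by omega) (by omega)]
    omega
  set iiN : Nat := ii.toNat with hiiN
  have hiiNlt : iiN < A.length := by omega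
  set row : List Int := A.getD iiN [] with hrow
  have hrowe : A.getD iiN [] = A[iiN] := List.getD_eq_getElem _ _ hiiNlt
  have hrowmem : row ∈ A := by rw [hrow, hrowe]; exact List.getElem_mem hiiNlt
  obtain ⟨hp2a, hp2b⟩ := hpre2 row hrowmem
  have hn : 0 < row.length := by by_contra h; omega
  set jjN : Nat := ((j - 1).emod (row.length : Int)).toNat with hjjN
  have hjjNlt : jjN < row.length := emod_toNat_lt _ _ hn
  set e : Int := row.getD jjN 0 with he
  set col : List Int := A.map (colfun j) with hcolv
  have hcollen : col.length = A.length := by simp [hcolv]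
  have hcoliiN : col.getD iiN 0 = e := by
    rw [hcolv, List.getD_eq_getElem _ _ (by simpa using hiiNlt), List.getElem_map]
    rw [he, colfun, hjjN, hrow, hrowe]
  have hget1 : PySem.List.pyGet? A ((0:Int) - 1) = some row := by
    rw [pyGet_emod A _ (by omega) (by omega), ← hii, ← hiiN,
      List.getElem?_eq_getElem hiiNlt, hrow, hrowe]
  have hcol : pv_get_col A j = some col := by
    rw [pv_get_col, get_col_eq A j (fun r hr => hpre2 r hr), hcolv]
  have hget2 : PySem.List.pyGet? row (j - 1) = some e := by
    rw [pyGet_emod row _ hp2a hp2b, ← hjjN, List.getElem?_eq_getElem hjjNlt, he,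
      List.getD_eq_getElem _ _ hjjNlt]
  have hslice1 : PySem.List.slice row none (some (j - 1)) = row.take jjN := by
    by_cases hj : 0 ≤ j - 1
    · rw [PySem.List.slice_to row hj]
      congr 1
      have h4 := emod_of_nonneg_lt (j-1) (row.length:Int) hj hp2b
      omega
    · have hk : 0 < (-(j-1)).toNat := by omega
      have hs : some (j - 1) = some (-(((-(j-1)).toNat : Nat) : Int)) := by congr 1; omega
      rw [hs, PySem.List.slice_to_neg_natCast row _ hk]
      congr 1
      have h4 := emod_of_neg (j-1) (row.length:Int) (by omega) hp2a (by omega)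
      omega
  have hslice2 : PySem.List.slice col (some 0) none = col.drop 0 := by
    rw [PySem.List.slice_from col (by omega)]
    rfl
  have hA : is_leading_entry A 0 j =
      (if e == 0 then false
       else if ((row.take jjN).any (fun x => x != 0)) then false
       else if ((col.drop 0).any (fun x => x != 0)) then false
       else true) := by
    rw [is_leading_entry]
    simp only [hget1, hcol, hget2, hslice1, hslice2]
  rw [hA]
  by_cases hez : e = 0
  · rw [if_pos (by simpa using hez)]
  · rw [if_neg (by simpa using hez)]
    by_cases hP : (row.take jjN).any (fun x => x != 0) = true
    · rw [if_pos hP]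
    · rw [if_neg hP]
      have hany : (col.drop 0).any (fun x => x != 0) = true := by
        rw [any_drop_iff]
        exact ⟨iiN, by omega, by omega, by rw [hcoliiN]; exact hez⟩
      rw [if_pos hany]

lemma zero_B_iff (A : List (List Int)) (j : Int)
    (hpre1 : PySem.Raise.InRange A.length (0 - 1))
    (hpre2 : ∀ row ∈ A, PySem.Raise.InRange row.length (j - 1)) :
    is_leading_entry_alt A 0 j = true ↔
      ((A.getLastD []).getD ((j - 1).emod ((A.getLastD []).length : Int)).toNat 0 ≠ 0 ∧
       ∀ k < ((j - 1).emod ((A.getLastD []).length : Int)).toNat, (A.getLastD []).getD k 0 = 0) := by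
  obtain ⟨hp1a, hp1b⟩ := hpre1
  have hm : 0 < A.length := by by_contra h; omega
  have hne : A ≠ [] := by intro h; rw [h] at hm; simp at hm
  set ii : Int := ((0:Int) - 1).emod (A.length : Int) with hii
  have hiieq : ii = A.length - 1 := by
    rw [hii, emod_of_neg _ _ (by omega) (by omega) (by omega)]
    omega
  have hiinn : 0 ≤ ii := by omega
  set iiN : Nat := ii.toNat with hiiN
  have hiiNlt : iiN < A.length := by omega
  set row : List Int := A.getD iiN [] with hrow
  have hrowe : A.getD iiN [] = A[iiN] := List.getD_eq_getElem _ _ hiiNlt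
  have hrowmem : row ∈ A := by rw [hrow, hrowe]; exact List.getElem_mem hiiNlt
  have hlastrow : A.getLastD [] = row := by
    rw [getLastD_eq_getD A hne, hrow]
    congr 1
    omega
  obtain ⟨hp2a, hp2b⟩ := hpre2 row hrowmem
  have hn : 0 < row.length := by by_contra h; omega
  set jjN : Nat := ((j - 1).emod (row.length : Int)).toNat with hjjN
  have hjjNlt : jjN < row.length := emod_toNat_lt _ _ hn
  set e : Int := row.getD jjN 0 with he
  set col : List Int := A.map (colfun j) with hcolv
  have hcollen : col.length = A.length := by simp [hcolv]
  have hcoliiN : col.getD iiN 0 = e := by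
    rw [hcolv, List.getD_eq_getElem _ _ (by simpa using hiiNlt), List.getElem_map]
    rw [he, colfun, hjjN, hrow, hrowe]
  have hmod1 : PySem.Int.mod? ((0:Int) - 1) (A.length : Int) = some ii := by
    unfold PySem.Int.mod?
    rw [if_neg (by omega : ¬ (A.length : Int) = 0), fmod_eq_emod_of_pos _ _ (by omega)]
  have hmod2 : PySem.Int.mod? (j - 1) (row.length : Int) = some ((j-1).emod (row.length : Int)) := by
    unfold PySem.Int.mod?
    rw [if_neg (by omega : ¬ (row.length : Int) = 0), fmod_eq_emod_of_pos _ _ (by omega)]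
  have hget1 : PySem.List.pyGet? A ((0:Int) - 1) = some row := by
    rw [pyGet_emod A _ (by omega) (by omega), ← hii, ← hiiN,
      List.getElem?_eq_getElem hiiNlt, hrow, hrowe]
  have hfold : (PySem.List.enumerate A 0).foldl
      (fun acc p => (PySem.List.pyGet? p.2 (j - 1)).elim acc
        (fun v => if v != 0 then some p.1 else acc)) (none : Option Int) = lastLoop col 0 none := by
    rw [lastLoop, hcolv, enumerate_map, List.foldl_map]
    apply PySem.List.foldl_congr_mem
    intro acc p hp
    obtain ⟨k, hk, hpe⟩ := (PySem.List.mem_enumerate_iff A 0 p).mp hp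
    have hpmem : p.2 ∈ A := by rw [hpe]; exact List.getElem_mem hk
    obtain ⟨ha, hb⟩ := hpre2 p.2 hpmem
    have hple : 0 < p.2.length := by by_contra h; omega
    rw [pyGet_emod p.2 _ ha hb, List.getElem?_eq_getElem (emod_toNat_lt _ _ hple)]
    simp only [colfun, Option.elim_some]
    rw [List.getD_eq_getElem _ _ (emod_toNat_lt _ _ hple)]
  have hB : is_leading_entry_alt A 0 j =
      (if lastLoop col 0 none != some ii then false
       else (row.findIdx? (fun v => v != 0)) == some jjN) := by
    rw [is_leading_entry_alt]
    simp only [hget1, hmod1, hmod2, Option.elim_some, hfold]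
    rfl
  rw [hB, hlastrow]
  have hiiI : ii = (0 : Int) + (iiN : Int) := by omega
  constructor
  · intro htrue
    by_cases hll : lastLoop col 0 none = some ii
    · rw [hll] at htrue
      simp only [bne_self_eq_false, Bool.false_eq_true, if_false] at htrue
      have hfi : row.findIdx? (fun v => v != 0) = some jjN := by
        simpa [beq_iff_eq] using htrue
      exact (findIdx_iff row jjN hjjNlt).mp hfi
    · rw [if_pos (by simpa [bne_iff_ne] using hll)] at htrue
      exact absurd htrue (by simp)
  · intro ⟨h1, h2⟩
    have hfi : row.findIdx? (fun v => v != 0) = some jjN :=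
      (findIdx_iff row jjN hjjNlt).mpr ⟨h1, h2⟩
    have hll : lastLoop col 0 none = some ii := by
      rw [hiiI, lastLoop_eq_some_iff col 0 iiN (by omega)]
      refine ⟨by rw [hcoliiN]; exact h1, ?_⟩
      intro k hk1 hk2
      omega
    rw [hll]
    simp only [bne_self_eq_false, Bool.false_eq_true, if_false]
    simp [hfi]

lemma take_all_zero_iff (xs : List Int) (t : Nat) :
    ((xs.take t).all (fun x => x == 0) = true) ↔ ∀ k < t, xs.getD k 0 = 0 := by
  rw [List.all_eq_true]
  constructor
  · intro h k hk
    by_cases hl : k < xs.length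
    · have := h (xs.getD k 0) (List.mem_take_iff_getElem.mpr
        ⟨k, by omega, (List.getD_eq_getElem _ _ hl).symm⟩)
      simpa using this
    · exact List.getD_eq_default _ _ (by omega)
  · intro h x hx
    obtain ⟨k, hk, he⟩ := List.mem_take_iff_getElem.mp hx
    have := h k (by omega)
    rw [List.getD_eq_getElem _ _ (by omega)] at this
    simp [← he, this]

lemma D_iff (A : List (List Int)) (i j : Int) :
    D_is_leading_entry A i j ↔ (i = 0 ∧ A ≠ [] ∧
      (A.getLastD []).getD ((j - 1).emod ((A.getLastD []).length : Int)).toNat 0 ≠ 0 ∧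
      ∀ k < ((j - 1).emod ((A.getLastD []).length : Int)).toNat, (A.getLastD []).getD k 0 = 0) := by
  unfold D_is_leading_entry
  rw [Option.any_eq_true]
  constructor
  · intro ⟨hi, r, hr, hb⟩
    have hne : A ≠ [] := by intro h; rw [h] at hr; simp at hr
    have hlast : A.getLastD [] = r := by rw [List.getLastD_eq_getLast?, hr]; rfl
    rw [Bool.and_eq_true] at hb
    obtain ⟨hb1, hb2⟩ := hb
    rw [hlast]
    exact ⟨hi, hne, by simpa [bne_iff_ne] using hb2,
      (take_all_zero_iff r _).mp hb1⟩
  · intro ⟨hi, hne, h1, h2⟩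
    refine ⟨hi, A.getLastD [], ?_, ?_⟩
    · rw [List.getLastD_eq_getLast?]
      cases h : A.getLast? with
      | none => exact absurd (List.getLast?_eq_none_iff.mp h) hne
      | some r => rfl
    · rw [Bool.and_eq_true]
      exact ⟨(take_all_zero_iff _ _).mpr h2, by simpa [bne_iff_ne] using h1⟩

theorem is_leading_entry_spec : Claim_unchanged_is_leading_entry := by
  intro A i j _ hpre
  unfold Spec_is_leading_entry
  intro hD
  obtain ⟨hpre1, hpre2⟩ := hpre
  by_cases hi : i = 0
  · subst hi
    rw [zero_A_false A j hpre1 hpre2]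
    by_cases hb : is_leading_entry_alt A 0 j = true
    · exfalso
      apply hD
      obtain ⟨h1, h2⟩ := (zero_B_iff A j hpre1 hpre2).mp hb
      have hm : 0 < A.length := by
        obtain ⟨ha, hb'⟩ := hpre1
        by_contra h
        omega
      have hne : A ≠ [] := by
        intro h
        rw [h] at hm
        simp at hm
      exact (D_iff A 0 j).mpr ⟨rfl, hne, h1, h2⟩
    · rw [Bool.not_eq_true] at hb
      rw [hb]
  · exact main_ne A i j hpre1 hpre2 hi

theorem is_leading_entry_changed : Claim_changed_is_leading_entry := by
  unfold Claim_changed_is_leading_entry; decide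

theorem is_leading_entry_tight : Claim_exact_is_leading_entry := by
  intro A i j _ hpre hD
  obtain ⟨hpre1, hpre2⟩ := hpre
  obtain ⟨hi0, hne, h1, h2⟩ := (D_iff A i j).mp hD
  subst hi0
  rw [zero_A_false A j hpre1 hpre2, (zero_B_iff A j hpre1 hpre2).mpr ⟨h1, h2⟩]
  simp
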